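-- pv_equiv track=rewrite | github.com/Ifinitysystem/cmpsc | PS5.py | nearly_equal
-- ===== SOURCE A (Python) =====
-- def nearly_equal(s1, s2):
--     s1 = s1.lower()
--     s2 = s2.lower()
--
--     freq1 = {}
--     freq2 = {}
--
--     for i in range(len(s1)):
--         ch = s1[i]
--         if ch >= 'a' and ch <= 'z':
--             if ch in freq1:
--                 freq1[ch] = freq1.get(ch) + 1
--             else:
--                 freq1[ch] = 1
--
--     for i in range(len(s2)):
--         ch = s2[i]
--         if ch >= 'a' and ch <= 'z':
--             if ch in freq2:
--                 freq2[ch] = freq2.get(ch) + 1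
--             else:
--                 freq2[ch] = 1
--
--     all_keys = {}
--
--     keys1 = freq1.keys()
--     for i in range(len(list(keys1))):
--         key = list(keys1)[i]
--         if key not in all_keys:
--             all_keys[key] = True
--
--     keys2 = freq2.keys()
--     for i in range(len(list(keys2))):
--         key = list(keys2)[i]
--         if key not in all_keys:
--             all_keys[key] = True
--
--     all_keys_list = list(all_keys.keys())
--
--     for i in range(len(all_keys_list)):
--         key = all_keys_list[i]
--         count1 = freq1.get(key)
--         count2 = freq2.get(key)
--
--         if count1 is None:
--             count1 = 0
--         if count2 is None:
--             count2 = 0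
--
--         if abs(count1 - count2) > 2:
--             return False
--
--     return True
-- ===== SOURCE B (Python) =====
-- def nearly_equal(s1, s2):
--     # Fixed alphabet scan: no frequency tables at all.  For each of the 26
--     # lowercase letters compare the two occurrence counts directly; letters
--     # absent from both strings trivially pass (difference 0), and non-letters
--     # are never inspected, so this matches A's letter-only comparison.
--     t1 = s1.lower()
--     t2 = s2.lower()
--     for code in range(ord('a'), ord('z') + 1):
--         ch = chr(code)
--         if abs(t1.count(ch) - t2.count(ch)) > 2:
--             return False
--     return True
-- ===== Notes on version B (the rewrite author's own statement) =====
-- stated objective: simpler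
-- what changed: Drops A's two frequency dicts and the key-union pass entirely: B scans the fixed 26-letter alphabet and compares str.count of each letter in the two lowercased strings, returning False on the first letter whose counts differ by more than 2.
import Mathlib
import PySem

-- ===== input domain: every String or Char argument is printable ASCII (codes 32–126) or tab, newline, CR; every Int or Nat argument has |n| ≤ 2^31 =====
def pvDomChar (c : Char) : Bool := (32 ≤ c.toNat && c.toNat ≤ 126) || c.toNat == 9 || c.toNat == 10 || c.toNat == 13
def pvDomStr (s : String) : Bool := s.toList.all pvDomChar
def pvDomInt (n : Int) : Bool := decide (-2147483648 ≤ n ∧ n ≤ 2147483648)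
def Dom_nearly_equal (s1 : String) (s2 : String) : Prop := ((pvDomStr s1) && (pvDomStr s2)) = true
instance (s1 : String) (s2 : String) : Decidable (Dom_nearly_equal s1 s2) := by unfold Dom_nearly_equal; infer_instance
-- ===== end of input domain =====

-- B replaces A's two frequency dicts + key-union pass with a fixed 26-letter scan comparing per-letter counts; same result, simpler.


-- ===== PORT A =====
-- Python's ch >= 'a' and ch <= 'z'
def pvIsAZ (ch : Char) : Bool := decide ('a' ≤ ch) && decide ('z' ≥ ch)

def nearly_equal (s1 : String) (s2 : String) : Bool :=
  let t1 := PySem.Chars.lower s1.toList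
  let t2 := PySem.Chars.lower s2.toList
  -- for i in range(len(s1)): ch = s1[i]; guarded count into freq1
  let freq1 : PySem.Dict Char Int := t1.foldl (fun d ch =>
      if pvIsAZ ch then
        if d.contains ch then d.insert ch ((d.get? ch).getD 0 + 1) else d.insert ch 1
      else d) PySem.Dict.empty
  let freq2 : PySem.Dict Char Int := t2.foldl (fun d ch =>
      if pvIsAZ ch then
        if d.contains ch then d.insert ch ((d.get? ch).getD 0 + 1) else d.insert ch 1
      else d) PySem.Dict.empty
  -- all_keys: insert each key of freq1 then freq2 if not already present
  let allKeys : PySem.Dict Char Bool := freq1.keys.foldl (fun ak key =>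
      if ak.contains key then ak else ak.insert key true) PySem.Dict.empty
  let allKeys : PySem.Dict Char Bool := freq2.keys.foldl (fun ak key =>
      if ak.contains key then ak else ak.insert key true) allKeys
  let allKeysList := allKeys.keys
  -- final loop: return False on the first key with |count1 - count2| > 2, else True
  allKeysList.all (fun key =>
    let count1 := (freq1.get? key).getD 0
    let count2 := (freq2.get? key).getD 0
    decide (|count1 - count2| ≤ 2))

-- ===== PORT B =====
-- for code in range(ord('a'), ord('z')+1): early return False = List.all over pyRange 97 123;
-- t.count(ch) with a 1-character ch is exactly the character count (List.count on the lowered chars).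
def nearly_equal_alt (s1 : String) (s2 : String) : Bool :=
  let t1 := PySem.Chars.lower s1.toList
  let t2 := PySem.Chars.lower s2.toList
  (PySem.List.pyRange 97 123 1).all (fun code =>
    let ch := Char.ofNat code.toNat
    decide (|(t1.count ch : Int) - (t2.count ch : Int)| ≤ 2))

-- ===== PRECONDITION & SPEC =====
def Spec_nearly_equal (s1 : String) (s2 : String) (out : Bool) : Prop := out = nearly_equal_alt s1 s2
instance (s1 : String) (s2 : String) (out : Bool) : Decidable (Spec_nearly_equal s1 s2 out) := by unfold Spec_nearly_equal; infer_instance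

-- ===== CLAIM (what is proved, stated in full; the proofs are below) =====
def Claim_equal_nearly_equal : Prop := ∀ (s1 : String) (s2 : String), Dom_nearly_equal s1 s2 → Spec_nearly_equal s1 s2 (nearly_equal s1 s2)

-- ===== LEMMAS AND PROOFS =====

-- A's guarded count body is the standard counting insert.
theorem pvCountBody_eq (d : PySem.Dict Char Int) (ch : Char) :
    (if d.contains ch then d.insert ch ((d.get? ch).getD 0 + 1) else d.insert ch 1)
      = d.insert ch (d.getD ch 0 + 1) := by
  by_cases h : d.contains ch = true
  · simp [h, PySem.Dict.getD_eq_get?_getD]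
  · simp only [Bool.not_eq_true] at h
    rw [PySem.Dict.getD_of_not_contains d 0 h]; simp [h]

-- keys of A's "insert if absent" fold: ordered set-update of the keys.
theorem pvKeys_fold_guard_insert (l : List Char) (d : PySem.Dict Char Bool) :
    (l.foldl (fun ak key => if ak.contains key then ak else ak.insert key true) d).keys
      = PySem.Set.update d.keys l := by
  induction l generalizing d with
  | nil => simp [PySem.Set.update]
  | cons x xs ih =>
      rw [List.foldl_cons, PySem.Set.update_cons]
      by_cases h : d.contains x = true
      · rw [if_pos h, ih, PySem.Set.add_of_mem]
        exact (PySem.Dict.contains_iff_mem_keys d x).mp h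
      · simp only [Bool.not_eq_true] at h
        rw [if_neg (by simp [h]), ih, PySem.Dict.keys_insert_of_not_contains d _ h,
            PySem.Set.add_of_not_mem]
        exact fun hm => by simp [(PySem.Dict.contains_iff_mem_keys d x).mpr hm] at h

-- pvIsAZ read as a bound on the character code.
theorem pvIsAZ_iff (ch : Char) : pvIsAZ ch = true ↔ 97 ≤ ch.toNat ∧ ch.toNat ≤ 122 := by
  unfold pvIsAZ
  rw [Bool.and_eq_true, decide_eq_true_iff, decide_eq_true_iff, ge_iff_le,
      Char.le_def, Char.le_def, UInt32.le_iff_toNat_le, UInt32.le_iff_toNat_le]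
  exact Iff.rfl

theorem pvToNat_ofNat (n : Nat) (h : n < 55296) : (Char.ofNat n).toNat = n := by
  rw [Char.toNat_ofNat, if_pos (Or.inl h)]

theorem nearly_equal_eq_alt (s1 s2 : String) : nearly_equal s1 s2 = nearly_equal_alt s1 s2 := by
  unfold nearly_equal nearly_equal_alt
  simp only []
  set t1 := PySem.Chars.lower s1.toList with ht1
  set t2 := PySem.Chars.lower s2.toList with ht2
  set L1 := t1.filter pvIsAZ with hL1
  set L2 := t2.filter pvIsAZ with hL2
  -- A's freq dicts are counters of the filtered letters
  have hfreq : ∀ t : List Char,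
      t.foldl (fun d ch =>
        if pvIsAZ ch then
          if d.contains ch then d.insert ch ((d.get? ch).getD 0 + 1) else d.insert ch 1
        else d) PySem.Dict.empty = PySem.Dict.counter (t.filter pvIsAZ) := by
    intro t
    rw [← PySem.Dict.foldl_insert_getD_add_one_eq_counter, ← List.foldl_filter]
    exact PySem.List.foldl_congr_mem _ _ _ _ (fun d ch _ => pvCountBody_eq d ch)
  rw [hfreq t1, hfreq t2]
  rw [pvKeys_fold_guard_insert, pvKeys_fold_guard_insert,
      PySem.Dict.keys_counter, PySem.Dict.keys_counter]
  rw [Bool.eq_iff_iff]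
  simp only [List.all_eq_true]
  -- letters of L1/L2 count the same in the unfiltered strings
  have hcount : ∀ (t : List Char) (ch : Char), pvIsAZ ch = true →
      (t.filter pvIsAZ).count ch = t.count ch := by
    intro t ch h
    exact List.count_filter h
  constructor
  · -- A's check over its key union implies B's check over the whole alphabet
    intro h code hcode
    rw [PySem.List.mem_pyRange_one] at hcode
    set ch := Char.ofNat code.toNat with hch
    have hv : code.toNat < 55296 := by omega
    have hchAZ : pvIsAZ ch = true := by
      rw [pvIsAZ_iff, hch, pvToNat_ofNat _ hv]
      omega
    simp only [decide_eq_true_eq]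
    by_cases h1 : ch ∈ L1
    case pos =>
      have hmem : ch ∈ PySem.Set.update (PySem.Set.update (PySem.Dict.empty : PySem.Dict Char Bool).keys
          (PySem.Set.ofList L1)) (PySem.Set.ofList L2) := by
        rw [PySem.Set.mem_update, PySem.Set.mem_update, PySem.Set.mem_ofList]
        exact Or.inl (Or.inr h1)
      have := h ch hmem
      rw [← hcount t1 ch hchAZ, ← hcount t2 ch hchAZ]
      simpa [← PySem.Dict.getD_eq_get?_getD, PySem.Dict.getD_counter] using this
    case neg =>
      by_cases h2 : ch ∈ L2
      case pos =>
        have hmem : ch ∈ PySem.Set.update (PySem.Set.update (PySem.Dict.empty : PySem.Dict Char Bool).keys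
            (PySem.Set.ofList L1)) (PySem.Set.ofList L2) := by
          rw [PySem.Set.mem_update, PySem.Set.mem_ofList]
          exact Or.inr h2
        have := h ch hmem
        rw [← hcount t1 ch hchAZ, ← hcount t2 ch hchAZ]
        simpa [← PySem.Dict.getD_eq_get?_getD, PySem.Dict.getD_counter] using this
      case neg =>
        -- ch occurs in neither string's letters: both counts are 0
        have c1 : t1.count ch = 0 := by
          rw [← hcount t1 ch hchAZ]; exact List.count_eq_zero.mpr h1
        have c2 : t2.count ch = 0 := by
          rw [← hcount t2 ch hchAZ]; exact List.count_eq_zero.mpr h2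
        simp [c1, c2]
  · -- B's alphabet-wide check implies A's check on its keys (which are all letters)
    intro h key hk
    have hkey : key ∈ L1 ∨ key ∈ L2 := by
      rw [PySem.Set.mem_update, PySem.Set.mem_update, PySem.Set.mem_ofList,
          PySem.Set.mem_ofList] at hk
      rcases hk with (h0 | h1) | h2
      · simp [PySem.Dict.keys_empty] at h0
      · exact Or.inl h1
      · exact Or.inr h2
    have hkAZ : pvIsAZ key = true := by
      rcases hkey with h1 | h2
      · exact (List.mem_filter.mp (hL1 ▸ h1)).2
      · exact (List.mem_filter.mp (hL2 ▸ h2)).2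
    have hrange := (pvIsAZ_iff key).mp hkAZ
    have hcode : (key.toNat : Int) ∈ PySem.List.pyRange 97 123 1 := by
      rw [PySem.List.mem_pyRange_one]; omega
    have := h (key.toNat : Int) hcode
    have hofNat : Char.ofNat ((key.toNat : Int)).toNat = key := by
      rw [Int.toNat_natCast]; exact Char.ofNat_toNat key
    rw [hofNat] at this
    simp only [decide_eq_true_eq] at this
    rw [← hcount t1 key hkAZ, ← hcount t2 key hkAZ] at this
    simpa [← PySem.Dict.getD_eq_get?_getD, PySem.Dict.getD_counter] using this

-- ===== VERDICT (by name: the statement is the Claim_ definition above) =====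
theorem nearly_equal_spec : Claim_equal_nearly_equal := by
  intro s1 s2 _
  exact nearly_equal_eq_alt s1 s2
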